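-- pv_equiv track=rewrite | github.com/noraham/Fibonacci-generator | fibonacci.py | fibo_odd_version3
-- ===== SOURCE A (Python) =====
-- def fibo_odd_version3(n):
--     """Modified version2 so that starting array (Fibonacci Sequence) is consistent
--        and user can specify which odd Fibo Num they want (not hard-coded)"""
--
--     fib = [0, 1]
--     count = 1
--
--     if n <= count:
--         return n # fail fast
--
--     while count < n:
--         next_fib = fib[-1] + fib[-2]
--         fib.append(next_fib)
--         if next_fib % 2 == 1:
--             count += 1
--
--     return fib[-1]
-- ===== SOURCE B (Python) =====
-- def fibo_odd_version3(n):
--     """n-th odd Fibonacci number via index mapping + fast doubling (O(log n) mults)."""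
--     if n <= 1:
--         return n
--     m = (3 * n - 1) // 2  # index of the n-th odd Fibonacci number
--
--     def fd(k):
--         # returns (F(k), F(k+1)) by fast doubling
--         if k == 0:
--             return (0, 1)
--         a, b = fd(k // 2)
--         c = a * (2 * b - a)
--         d = a * a + b * b
--         if k % 2 == 0:
--             return (c, d)
--         return (d, c + d)
--
--     return fd(m)[0]
-- ===== Notes on version B (the rewrite author's own statement) =====
-- stated objective: faster
-- what changed: Replaces the linear loop that generates every Fibonacci number while counting odd ones by a closed-form index map (the n-th odd Fibonacci number is F((3n-1)//2)) followed by fast-doubling computation of that single Fibonacci number.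
import Mathlib
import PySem

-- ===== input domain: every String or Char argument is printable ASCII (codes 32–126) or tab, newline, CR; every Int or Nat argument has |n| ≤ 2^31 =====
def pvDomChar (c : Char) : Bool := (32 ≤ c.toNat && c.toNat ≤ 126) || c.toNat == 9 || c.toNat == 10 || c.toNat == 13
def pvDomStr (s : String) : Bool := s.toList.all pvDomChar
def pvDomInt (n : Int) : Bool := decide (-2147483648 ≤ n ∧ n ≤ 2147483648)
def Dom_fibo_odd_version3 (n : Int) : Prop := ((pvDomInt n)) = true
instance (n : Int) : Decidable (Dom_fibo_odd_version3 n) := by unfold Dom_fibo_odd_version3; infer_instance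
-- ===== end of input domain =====

-- B replaces A's linear generate-and-count loop with a closed-form index map plus
-- fast doubling (objective: faster, asymptotically fewer big-int operations).

-- ===== PORT A =====
-- A's while-loop, step for step. A only reads fib[-1] and fib[-2], so the state is
-- carried as the last two values (a, b) instead of the growing list; the fuel
-- argument only makes the recursion total (2*n steps are proved sufficient below)
-- and does not change the computation on any admitted input.
def pvLoopA (fuel : Nat) (n a b count : Int) : Int :=
  match fuel with
  | 0 => b
  | fuel + 1 =>
    if count < n then
      let next_fib := a + b
      if PySem.Int.mod next_fib 2 == 1 then
        pvLoopA fuel n b next_fib (count + 1)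
      else
        pvLoopA fuel n b next_fib count
    else b

def fibo_odd_version3 (n : Int) : Int :=
  if n ≤ 1 then n
  else pvLoopA (2 * n).toNat n 0 1 1

-- ===== PORT B =====
-- fast doubling: fd k = (F(k), F(k+1)).  Nat subtraction in `2 * b - a` is exact
-- here because b = F(k+1) ≥ F(k) = a on every call (proved in pvFd_eq below).
def pvFd (k : Nat) : Nat × Nat :=
  if h : k = 0 then (0, 1)
  else
    let p := pvFd (k / 2)
    let a := p.1
    let b := p.2
    let c := a * (2 * b - a)
    let d := a * a + b * b
    if k % 2 = 0 then (c, d) else (d, c + d)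
decreasing_by exact Nat.div_lt_self (Nat.pos_of_ne_zero h) (by omega)

def fibo_odd_version3_alt (n : Int) : Int :=
  if n ≤ 1 then n
  else ((pvFd (PySem.Int.floordiv (3 * n - 1) 2).toNat).1 : Int)

-- ===== PRECONDITION & SPEC =====
def Spec_fibo_odd_version3 (n : Int) (out : Int) : Prop := out = fibo_odd_version3_alt n
instance (n : Int) (out : Int) : Decidable (Spec_fibo_odd_version3 n out) := by unfold Spec_fibo_odd_version3; infer_instance

-- ===== CLAIM (what is proved, stated in full; the proofs are below) =====
def Claim_equal_fibo_odd_version3 : Prop := ∀ (n : Int), Dom_fibo_odd_version3 n → Spec_fibo_odd_version3 n (fibo_odd_version3 n)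

-- ===== LEMMAS AND PROOFS =====

-- fast doubling computes Fibonacci pairs
lemma pvFd_eq (k : Nat) : pvFd k = (Nat.fib k, Nat.fib (k + 1)) := by
  induction k using Nat.strong_induction_on with
  | _ k ih =>
    rw [pvFd]
    by_cases h : k = 0
    · simp [h]
    · rw [dif_neg h, ih (k / 2) (Nat.div_lt_self (Nat.pos_of_ne_zero h) (by omega))]
      rcases Nat.even_or_odd k with ⟨q, hq⟩ | ⟨q, hq⟩
      · have hdiv : k / 2 = q := by omega
        rw [hdiv, if_pos (show k % 2 = 0 by omega), show k = 2 * q by omega,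
          Nat.fib_two_mul, Nat.fib_two_mul_add_one]
        ring_nf
      · have hdiv : k / 2 = q := by omega
        rw [hdiv, if_neg (show ¬ k % 2 = 0 by omega), show k = 2 * q + 1 by omega,
          show 2 * q + 1 + 1 = 2 * q + 2 by ring, Nat.fib_add_two,
          Nat.fib_two_mul, Nat.fib_two_mul_add_one]
        ring_nf

-- parity of Fibonacci numbers: F(j) is even iff 3 ∣ j
lemma fib_mod_two (j : Nat) : Nat.fib j % 2 = if j % 3 = 0 then 0 else 1 := by
  induction j using Nat.strong_induction_on with
  | _ j ih =>
    match j with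
    | 0 => simp
    | 1 => simp
    | (m + 2) =>
      rw [Nat.fib_add_two]
      have h1 := ih m (by omega)
      have h2 := ih (m + 1) (by omega)
      split_ifs at h1 h2 ⊢ <;> omega

-- A's loop invariant: from state (F(k-1), F(k)) with count = k - k/3, it returns F(m),
-- where m = (3n-1)//2, provided 1 ≤ k ≤ m and the fuel covers the remaining m - k steps.
lemma pvLoopA_inv (n : Int) (m : Nat) (hn : 2 ≤ n)
    (hm : 3 * n - 2 ≤ 2 * (m : Int) ∧ 2 * (m : Int) ≤ 3 * n - 1) :
    ∀ (fuel k : Nat), 1 ≤ k → k ≤ m → m - k ≤ fuel →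
      pvLoopA fuel n (Nat.fib (k - 1)) (Nat.fib k) ((k - k / 3 : Nat) : Int)
        = (Nat.fib m : Int) := by
  intro fuel
  induction fuel with
  | zero =>
    intro k hk1 hkm hfuel
    have : k = m := by omega
    simp [pvLoopA, this]
  | succ fuel ih =>
    intro k hk1 hkm hfuel
    rw [pvLoopA]
    by_cases hkm' : k = m
    · -- count has reached n: the loop exits and returns F(m)
      have hcount : ¬ (((k - k / 3 : Nat) : Int) < n) := by
        subst hkm'; omega
      rw [if_neg hcount, hkm']
    · -- k < m: count < n, one more iteration
      have hklt : k < m := by omega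
      have hcount : ((k - k / 3 : Nat) : Int) < n := by omega
      rw [if_pos hcount]
      have hfib : (Nat.fib (k - 1) : Int) + Nat.fib k = Nat.fib (k + 1) := by
        obtain ⟨k', rfl⟩ : ∃ k', k = k' + 1 := ⟨k - 1, by omega⟩
        rw [show k' + 1 + 1 = k' + 2 by ring, Nat.fib_add_two]
        push_cast; ring
      rw [hfib]
      have hpar : PySem.Int.mod (Nat.fib (k + 1) : Int) 2
          = ((Nat.fib (k + 1) % 2 : Nat) : Int) := by
        rw [PySem.Int.mod_eq_emod_of_pos (by omega)]
        omega
      have hfp := fib_mod_two (k + 1)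
      by_cases h3 : (k + 1) % 3 = 0
      · -- next Fibonacci number is even: count unchanged
        have : ¬ (PySem.Int.mod ((Nat.fib (k + 1) : Int)) 2 == 1) = true := by
          simp only [hpar]
          rw [if_pos h3] at hfp
          simp [hfp]
        rw [if_neg this]
        have hcnt : ((k - k / 3 : Nat) : Int) = (((k + 1) - (k + 1) / 3 : Nat) : Int) := by
          omega
        rw [hcnt, show k = (k + 1) - 1 by omega]
        exact ih (k + 1) (by omega) (by omega) (by omega)
      · -- next Fibonacci number is odd: count increments
        have : (PySem.Int.mod ((Nat.fib (k + 1) : Int)) 2 == 1) = true := by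
          simp only [hpar]
          rw [if_neg h3] at hfp
          simp [hfp]
        rw [if_pos this]
        have hcnt : ((k - k / 3 : Nat) : Int) + 1 = (((k + 1) - (k + 1) / 3 : Nat) : Int) := by
          omega
        rw [hcnt, show k = (k + 1) - 1 by omega]
        exact ih (k + 1) (by omega) (by omega) (by omega)

-- ===== VERDICT (by name: the statement is the Claim_ definition above) =====
theorem fibo_odd_version3_spec : Claim_equal_fibo_odd_version3 := by
  intro n _
  unfold Spec_fibo_odd_version3 fibo_odd_version3 fibo_odd_version3_alt
  by_cases hle : n ≤ 1
  · rw [if_pos hle, if_pos hle]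
  · rw [if_neg hle, if_neg hle]
    have hn : 2 ≤ n := by omega
    set M : Int := PySem.Int.floordiv (3 * n - 1) 2 with hM
    have hMed : M = (3 * n - 1) / 2 := by
      rw [hM, PySem.Int.floordiv_eq_ediv_of_pos (by omega)]
    have hMb : 3 * n - 2 ≤ 2 * M ∧ 2 * M ≤ 3 * n - 1 := by omega
    have hMpos : 0 < M := by omega
    have hcast : ((M.toNat : Int)) = M := Int.toNat_of_nonneg (by omega)
    rw [pvFd_eq]
    have hb : 3 * n - 2 ≤ 2 * ((M.toNat : Nat) : Int) ∧ 2 * ((M.toNat : Nat) : Int) ≤ 3 * n - 1 := by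
      rw [hcast]; exact hMb
    have := pvLoopA_inv n M.toNat hn hb (2 * n).toNat 1 (by omega) (by omega) (by omega)
    simpa using this
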